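-- pv_equiv track=rewrite | github.com/Amimer12/TP1-SSAD | django_Projet/appTP1/steganography_methods.py | steg_phrase
-- ===== SOURCE A (Python) =====
-- def steg_phrase(secret, text):
--     phrases = text.split('.')
--     error_message = ""
--     if len(phrases) < len(secret):
--        error_message = (F"It's impossible to hide your message in this text cause it contains {len(phrases)} sentences, insert more sentences or shorter message !")
--
--     textSteg = []
--     for index, phrase in enumerate(phrases):
--         if index < len(secret):
--            phraseSteg = secret[index] + phrase[1:]
--         else:
--            phraseSteg = phrase
--         textSteg.append(phraseSteg)
--
--     textSteg = '.'.join(textSteg)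
--     return textSteg ,error_message
-- ===== SOURCE B (Python) =====
-- def steg_phrase(secret, text):
--     # Single left-to-right character scan: no split/join; tracks sentence index and
--     # whether we are at the start of a sentence, substituting secret chars on the fly.
--     n_phrases = text.count('.') + 1
--     error_message = ""
--     if n_phrases < len(secret):
--         error_message = (F"It's impossible to hide your message in this text cause it contains {n_phrases} sentences, insert more sentences or shorter message !")
--     out = []
--     i = 0
--     start = True
--     for ch in text:
--         if start:
--             if ch == '.':
--                 if i < len(secret):
--                     out.append(secret[i])
--                 out.append('.')
--                 i += 1
--             else:
--                 out.append(secret[i] if i < len(secret) else ch)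
--                 start = False
--         else:
--             out.append(ch)
--             if ch == '.':
--                 i += 1
--                 start = True
--     if start and i < len(secret):
--         out.append(secret[i])
--     return ''.join(out), error_message
-- ===== Notes on version B (the rewrite author's own statement) =====
-- stated objective: alternative
-- what changed: Replaces split('.') / per-phrase loop / '.'.join by a single left-to-right character scan over the text that never builds the phrase list: a (sentence index, at-sentence-start) state machine substitutes secret characters in place, and the sentence count for the error message comes from text.count('.') + 1.
import Mathlib
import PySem

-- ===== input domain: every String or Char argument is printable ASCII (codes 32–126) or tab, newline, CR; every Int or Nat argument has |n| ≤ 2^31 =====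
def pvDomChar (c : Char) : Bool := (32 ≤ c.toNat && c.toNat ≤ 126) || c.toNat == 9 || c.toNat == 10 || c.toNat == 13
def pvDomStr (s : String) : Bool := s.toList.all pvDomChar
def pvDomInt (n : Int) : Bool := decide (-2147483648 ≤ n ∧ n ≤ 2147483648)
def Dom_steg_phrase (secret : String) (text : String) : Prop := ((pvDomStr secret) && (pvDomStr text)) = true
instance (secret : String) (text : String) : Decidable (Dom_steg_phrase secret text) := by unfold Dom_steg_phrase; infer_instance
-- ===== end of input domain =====

-- B replaces A's split('.')/per-phrase loop/'.'.join by a single character scan with an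
-- (index, at-sentence-start) state machine, counting sentences via text.count('.') + 1
-- (objective: alternative algorithm, same cost).

-- ===== PORT A =====
-- literal transliteration of A: split on '.', build the error message, then one loop over
-- enumerate(phrases) appending either secret[index] + phrase[1:] or phrase, then join.
def steg_phrase (secret : String) (text : String) : String × String :=
  let s := secret.toList
  let phrases := PySem.Chars.splitOn text.toList ['.']
  let error_message : List Char :=
    if phrases.length < s.length then
      "It's impossible to hide your message in this text cause it contains ".toList
        ++ PySem.Int.toChars (phrases.length : Int)
        ++ " sentences, insert more sentences or shorter message !".toList
    else []
  let textSteg : List (List Char) :=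
    (PySem.List.enumerate phrases 0).foldl
      (fun acc p =>
        let phraseSteg :=
          if p.1 < (s.length : Int) then
            PySem.List.pyGetD s p.1 ' ' :: PySem.List.slice p.2 (some 1) none
          else p.2
        acc ++ [phraseSteg]) []
  (String.ofList (PySem.Chars.join ['.'] textSteg), String.ofList error_message)

-- ===== PORT B =====
-- B's scan step: state (output so far, sentence index, at-sentence-start flag), one char.
def pvStepB (s : List Char) : (List Char × Nat × Bool) → Char → (List Char × Nat × Bool)
  | (out, i, start), ch =>
    if start then
      if ch = '.' then
        (out ++ (if i < s.length then [s.getD i ' '] else []) ++ ['.'], i + 1, true)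
      else
        (out ++ [if i < s.length then s.getD i ' ' else ch], i, false)
    else
      (out ++ [ch], if ch = '.' then i + 1 else i, ch = '.')

-- literal transliteration of Source B: count('.')+1 for the error message, then one fold of
-- pvStepB over the text's characters, then the trailing at-start append.
def steg_phrase_alt (secret : String) (text : String) : String × String :=
  let s := secret.toList
  let n_phrases := PySem.Chars.count text.toList ['.'] + 1
  let error_message : List Char :=
    if n_phrases < s.length then
      "It's impossible to hide your message in this text cause it contains ".toList
        ++ PySem.Int.toChars (n_phrases : Int)
        ++ " sentences, insert more sentences or shorter message !".toList
    else []
  let r := text.toList.foldl (pvStepB s) ([], 0, true)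
  let out := if r.2.2 = true ∧ r.2.1 < s.length then r.1 ++ [s.getD r.2.1 ' '] else r.1
  (String.ofList out, String.ofList error_message)

-- ===== PRECONDITION & SPEC =====
def Spec_steg_phrase (secret : String) (text : String) (out : String × String) : Prop := out = steg_phrase_alt secret text
instance (secret : String) (text : String) (out : String × String) : Decidable (Spec_steg_phrase secret text out) := by unfold Spec_steg_phrase; infer_instance

-- ===== CLAIM (what is proved, stated in full; the proofs are below) =====
def Claim_equal_steg_phrase : Prop := ∀ (secret : String) (text : String), Dom_steg_phrase secret text → Spec_steg_phrase secret text (steg_phrase secret text)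

-- ===== LEMMAS AND PROOFS =====

-- a simple forward recursion computing split('.') (pre = current phrase so far)
def pvSplitRec (pre : List Char) : List Char → List (List Char)
  | [] => [pre]
  | c :: t => if c = '.' then pre :: pvSplitRec [] t else pvSplitRec (pre ++ [c]) t

-- splitOn's fuelled go equals pvSplitRec when the fuel exceeds the input length
lemma pvGo_eq (fuel : Nat) (l cur : List Char) (acc : List (List Char))
    (h : l.length < fuel) :
    PySem.Chars.splitOn.go ['.'] fuel l cur acc = acc.reverse ++ pvSplitRec cur.reverse l := by
  induction l generalizing fuel cur acc with
  | nil =>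
    cases fuel with
    | zero => omega
    | succ f => simp [PySem.Chars.splitOn.go, pvSplitRec]
  | cons c t ih =>
    cases fuel with
    | zero => omega
    | succ f =>
      by_cases hc : c = '.'
      · subst hc
        have : PySem.Chars.splitOn.go ['.'] (f + 1) ('.' :: t) cur acc
            = PySem.Chars.splitOn.go ['.'] f t [] (cur.reverse :: acc) := by
          simp [PySem.Chars.splitOn.go, List.isPrefixOf]
        rw [this, ih f [] (cur.reverse :: acc) (by simp at h; omega)]
        simp [pvSplitRec]
      · have : PySem.Chars.splitOn.go ['.'] (f + 1) (c :: t) cur acc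
            = PySem.Chars.splitOn.go ['.'] f t (c :: cur) acc := by
          simp [PySem.Chars.splitOn.go, List.isPrefixOf]
          intro h'; exact absurd h'.symm hc
        rw [this, ih f (c :: cur) acc (by simp at h; omega)]
        simp [pvSplitRec, hc]

lemma pvSplitOn_eq (l : List Char) :
    PySem.Chars.splitOn l ['.'] = pvSplitRec [] l := by
  have := pvGo_eq (l.length + 1) l [] [] (by omega)
  simpa [PySem.Chars.splitOn] using this

-- count's fuelled go counts the dots
lemma pvCountGo_eq (fuel : Nat) (l : List Char) (acc : Nat) (h : l.length ≤ fuel) :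
    PySem.Chars.count.go ['.'] fuel l acc = acc + l.count '.' := by
  induction l generalizing fuel acc with
  | nil =>
    cases fuel with
    | zero => simp [PySem.Chars.count.go]
    | succ f => simp [PySem.Chars.count.go]
  | cons c t ih =>
    cases fuel with
    | zero => simp at h
    | succ f =>
      by_cases hc : c = '.'
      · subst hc
        have : PySem.Chars.count.go ['.'] (f + 1) ('.' :: t) acc
            = PySem.Chars.count.go ['.'] f t (acc + 1) := by
          simp [PySem.Chars.count.go, List.isPrefixOf]
        rw [this, ih f (acc + 1) (by simp at h; omega)]
        simp
        omega
      · have : PySem.Chars.count.go ['.'] (f + 1) (c :: t) acc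
            = PySem.Chars.count.go ['.'] f t acc := by
          simp [PySem.Chars.count.go, List.isPrefixOf]
          intro h'; exact absurd h'.symm hc
        rw [this, ih f acc (by simp at h; omega)]
        simp [hc]

lemma pvCount_eq (l : List Char) :
    PySem.Chars.count l ['.'] = l.count '.' := by
  simp [PySem.Chars.count, pvCountGo_eq l.length l 0 le_rfl]

-- the number of phrases is the number of dots plus one
lemma pvSplitRec_length (l pre : List Char) :
    (pvSplitRec pre l).length = l.count '.' + 1 := by
  induction l generalizing pre with
  | nil => simp [pvSplitRec]
  | cons c t ih =>
    by_cases hc : c = '.'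
    · subst hc; simp [pvSplitRec, ih]
    · simp [pvSplitRec, hc, ih]

-- A's transformation of phrase p at sentence index i
def pvTr (s : List Char) (i : Nat) (p : List Char) : List Char :=
  if i < s.length then s.getD i ' ' :: p.drop 1 else p

-- A's joined result on a phrase list, starting at sentence index i
def pvJoinSteg (s : List Char) (i : Nat) : List (List Char) → List Char
  | [] => []
  | [p] => pvTr s i p
  | p :: q :: ps => pvTr s i p ++ '.' :: pvJoinSteg s (i + 1) (q :: ps)

-- B's spec, computed structurally on the remaining characters (st = at-sentence-start)
def pvSpecT (s : List Char) (i : Nat) (st : Bool) : List Char → List Char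
  | [] => if st then (if i < s.length then [s.getD i ' '] else []) else []
  | c :: t =>
    if st then
      if c = '.' then (if i < s.length then [s.getD i ' '] else []) ++ '.' :: pvSpecT s (i + 1) true t
      else (if i < s.length then [s.getD i ' '] else [c]) ++ pvSpecT s i false t
    else
      if c = '.' then '.' :: pvSpecT s (i + 1) true t else c :: pvSpecT s i false t

-- B's fold plus the trailing append equals pvSpecT
lemma pvFoldB (s : List Char) (l out : List Char) (i : Nat) (st : Bool) :
    (let r := l.foldl (pvStepB s) (out, i, st);
     if r.2.2 = true ∧ r.2.1 < s.length then r.1 ++ [s.getD r.2.1 ' '] else r.1)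
    = out ++ pvSpecT s i st l := by
  induction l generalizing out i st with
  | nil =>
    cases st with
    | false => simp [pvSpecT]
    | true =>
      by_cases hi : i < s.length
      · simp [pvSpecT, hi]
      · simp [pvSpecT, hi]
  | cons c t ih =>
    cases st with
    | true =>
      by_cases hc : c = '.'
      · subst hc
        rw [List.foldl_cons]
        have hstep : pvStepB s (out, i, true) '.'
            = (out ++ (if i < s.length then [s.getD i ' '] else []) ++ ['.'], i + 1, true) := by
          simp [pvStepB]
        rw [hstep, ih]
        simp [pvSpecT]
      · rw [List.foldl_cons]
        have hstep : pvStepB s (out, i, true) c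
            = (out ++ [if i < s.length then s.getD i ' ' else c], i, false) := by
          simp [pvStepB, hc]
        rw [hstep, ih]
        by_cases hi : i < s.length <;> simp [pvSpecT, hc, hi]
    | false =>
      rw [List.foldl_cons]
      have hstep : pvStepB s (out, i, false) c
          = (out ++ [c], if c = '.' then i + 1 else i, decide (c = '.')) := by
        simp [pvStepB]
      rw [hstep]
      by_cases hc : c = '.'
      · subst hc; 
        rw [ih]; simp [pvSpecT]
      · simp only [if_neg hc, decide_eq_false hc]
        rw [ih]; simp [pvSpecT, hc]

-- pvSplitRec with a running prefix: the prefix lands in front of the first phrase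
lemma pvSplitRec_pre (l pre : List Char) :
    pvSplitRec pre l
      = (pre ++ (pvSplitRec [] l).headI) :: (pvSplitRec [] l).tail := by
  induction l generalizing pre with
  | nil => simp [pvSplitRec]
  | cons c t ih =>
    by_cases hc : c = '.'
    · subst hc; simp [pvSplitRec]
    · simp only [pvSplitRec, if_neg hc]
      rw [ih (pre ++ [c]), ih ([] ++ [c])]
      simp

-- helper: continuation of B's spec in the middle of a phrase
def pvCont (s : List Char) (i : Nat) (l : List Char) : List Char :=
  (pvSplitRec [] l).headI
    ++ (match (pvSplitRec [] l).tail with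
        | [] => []
        | q :: qs => '.' :: pvJoinSteg s (i + 1) (q :: qs))

lemma pvSplitRec_ne_nil (l pre : List Char) : pvSplitRec pre l ≠ [] := by
  cases l with
  | nil => simp [pvSplitRec]
  | cons c t =>
    by_cases hc : c = '.'
    · subst hc; simp [pvSplitRec]
    · rw [pvSplitRec_pre]; simp

-- central correspondence: B's spec equals A's join over the split, in both modes
lemma pvSpecT_eq (s : List Char) (l : List Char) (i : Nat) :
    pvSpecT s i true l = pvJoinSteg s i (pvSplitRec [] l)
    ∧ pvSpecT s i false l = pvCont s i l := by
  induction l generalizing i with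
  | nil =>
    constructor
    · by_cases hi : i < s.length <;> simp [pvSpecT, pvSplitRec, pvJoinSteg, pvTr, hi]
    · simp [pvSpecT, pvCont, pvSplitRec]
  | cons c t ih =>
    have htrec := pvSplitRec_pre t
    constructor
    · by_cases hc : c = '.'
      · subst hc
        have h1 : pvSplitRec [] ('.' :: t) = [] :: pvSplitRec [] t := by
          simp [pvSplitRec]
        rw [h1]
        rcases hrec : pvSplitRec [] t with _ | ⟨q, qs⟩
        · exact absurd hrec (pvSplitRec_ne_nil t [])
        · simp only [pvSpecT, pvJoinSteg, (ih (i + 1)).1, hrec, pvTr]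
          by_cases hi : i < s.length <;> simp [hi]
      · -- phrase continues: use the false-mode IH and the prefix lemma
        have h1 : pvSplitRec [] (c :: t) = (c :: (pvSplitRec [] t).headI) :: (pvSplitRec [] t).tail := by
          simp [pvSplitRec, hc, htrec [c]]
        rw [h1]
        have h2 := (ih i).2
        simp only [pvSpecT, if_neg hc, h2, pvCont]
        rcases hrec : pvSplitRec [] t with _ | ⟨p, ps⟩
        · exact absurd hrec (pvSplitRec_ne_nil t [])
        · rcases ps with _ | ⟨q, qs⟩
          · simp [pvJoinSteg, pvTr]
            by_cases hi : i < s.length <;> simp [hi]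
          · simp [pvJoinSteg, pvTr]
            by_cases hi : i < s.length <;> simp [hi]
    · by_cases hc : c = '.'
      · subst hc
        have h1 : pvSplitRec [] ('.' :: t) = [] :: pvSplitRec [] t := by
          simp [pvSplitRec]
        simp only [pvSpecT, (ih (i + 1)).1, pvCont, h1]
        rcases hrec : pvSplitRec [] t with _ | ⟨q, qs⟩
        · exact absurd hrec (pvSplitRec_ne_nil t [])
        · simp
      · have h1 : pvSplitRec [] (c :: t) = (c :: (pvSplitRec [] t).headI) :: (pvSplitRec [] t).tail := by
          simp [pvSplitRec, hc, htrec [c]]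
        simp only [pvSpecT, if_neg hc, (ih i).2, pvCont, h1]
        simp

-- A's step function on an (index, phrase) pair, parametrised by the secret characters.
def pvStep (s : List Char) (p : Int × List Char) : List Char :=
  if p.1 < (s.length : Int) then
    PySem.List.pyGetD s p.1 ' ' :: PySem.List.slice p.2 (some 1) none
  else p.2

lemma pvStep_eq_tr (s : List Char) (i : Nat) (p : List Char) :
    pvStep s ((i : Int), p) = pvTr s i p := by
  simp only [pvStep, pvTr]
  by_cases hi : i < s.length
  · rw [if_pos (by exact_mod_cast hi), if_pos hi]
    have h1 : (1 : Int) = ((1 : Nat) : Int) := by norm_num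
    rw [h1, PySem.List.slice_from_natCast, PySem.List.pyGetD_natCast]
  · rw [if_neg (by omega), if_neg hi]

-- A's mapped enumerate-loop, joined with '.', equals pvJoinSteg
lemma pvJoinA (s : List Char) (ps : List (List Char)) (i : Nat) :
    PySem.Chars.join ['.'] ((PySem.List.enumerate ps (i : Int)).map (pvStep s))
      = pvJoinSteg s i ps := by
  induction ps generalizing i with
  | nil => simp [pvJoinSteg, PySem.Chars.join, List.intercalate]
  | cons p ps ih =>
    rw [PySem.List.enumerate_cons, List.map_cons]
    cases ps with
    | nil =>
      simp [pvJoinSteg, PySem.Chars.join, List.intercalate, pvStep_eq_tr]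
    | cons q qs =>
      have hi1 : ((i : Int) + 1) = ((i + 1 : Nat) : Int) := by push_cast; ring
      rw [hi1, PySem.List.enumerate_cons, List.map_cons, PySem.Chars.join_cons_cons,
          ← List.map_cons, ← PySem.List.enumerate_cons, ih (i + 1)]
      simp [pvJoinSteg, pvStep_eq_tr]

-- ===== VERDICT (by name: the statement is the Claim_ definition above) =====
theorem steg_phrase_spec : Claim_equal_steg_phrase := by
  intro secret text _
  show steg_phrase secret text = steg_phrase_alt secret text
  unfold steg_phrase steg_phrase_alt
  set s := secret.toList with hs
  have hsplit := pvSplitOn_eq text.toList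
  have hcount := pvCount_eq text.toList
  have hlen : (PySem.Chars.splitOn text.toList ['.']).length
      = PySem.Chars.count text.toList ['.'] + 1 := by
    rw [hsplit, hcount, pvSplitRec_length]
  have hfold :
      (PySem.List.enumerate (PySem.Chars.splitOn text.toList ['.']) 0).foldl
        (fun acc p =>
          let phraseSteg :=
            if p.1 < (s.length : Int) then
              PySem.List.pyGetD s p.1 ' ' :: PySem.List.slice p.2 (some 1) none
            else p.2
          acc ++ [phraseSteg]) []
      = (PySem.List.enumerate (PySem.Chars.splitOn text.toList ['.']) 0).map (pvStep s) := by
    rw [PySem.List.foldl_append_singleton_eq_map]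
    rfl
  have hA : PySem.Chars.join ['.']
      ((PySem.List.enumerate (PySem.Chars.splitOn text.toList ['.']) 0).map (pvStep s))
      = pvJoinSteg s 0 (pvSplitRec [] text.toList) := by
    rw [hsplit]
    have := pvJoinA s (pvSplitRec [] text.toList) 0
    simpa using this
  have hB := pvFoldB s text.toList [] 0 true
  simp only [List.nil_append] at hB
  have hBspec : pvSpecT s 0 true text.toList = pvJoinSteg s 0 (pvSplitRec [] text.toList) :=
    (pvSpecT_eq s text.toList 0).1
  simp only [hfold, hA, hlen, hB, hBspec]
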